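-- pv_equiv track=rewrite | github.com/every-algorithm/python | operating-system/zero_page.py | find_zero_page
-- ===== SOURCE A (Python) =====
-- def find_zero_page(matrix, k):
--     rows = len(matrix)
--     cols = len(matrix[0]) if rows > 0 else 0
--     for i in range(rows - k + 1):
--         for j in range(cols - k + 1):
--             count = 0
--             for r in range(k):
--                 for c in range(k):
--                     if matrix[i + r][j + c] == 0:
--                         count += 1
--                     else:
--                         count = 0
--             if count == k * k:
--                 return (i, j)
--     return None
-- ===== SOURCE B (Python) =====
-- def find_zero_page(matrix, k):
--     if k < 0:
--         return None
--     rows = len(matrix)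
--     cols = len(matrix[0]) if rows > 0 else 0
--     # P[i][j] = number of zeros in matrix[:i][:j] (2D prefix sums of zero-indicators)
--     P = [[0] * (cols + 1)]
--     for i in range(rows):
--         prev = P[i]
--         row = matrix[i]
--         cur = [0]
--         s = 0
--         for j in range(cols):
--             if row[j] == 0:
--                 s += 1
--             cur.append(prev[j + 1] + s)
--         P.append(cur)
--     target = k * k
--     for i in range(rows - k + 1):
--         for j in range(cols - k + 1):
--             if P[i + k][j + k] - P[i][j + k] - P[i + k][j] + P[i][j] == target:
--                 return (i, j)
--     return None
-- ===== Notes on version B (the rewrite author's own statement) =====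
-- stated objective: alternative
-- what changed: B precomputes a 2D prefix-sum table of zero counts once and decides each k-by-k block with a single inclusion-exclusion query, replacing A's per-position k*k rescan with a resetting counter.
-- outside the precondition, e.g. on find_zero_page([[0, 0], [0]], 3): A returns None, B raises IndexError
import Mathlib
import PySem

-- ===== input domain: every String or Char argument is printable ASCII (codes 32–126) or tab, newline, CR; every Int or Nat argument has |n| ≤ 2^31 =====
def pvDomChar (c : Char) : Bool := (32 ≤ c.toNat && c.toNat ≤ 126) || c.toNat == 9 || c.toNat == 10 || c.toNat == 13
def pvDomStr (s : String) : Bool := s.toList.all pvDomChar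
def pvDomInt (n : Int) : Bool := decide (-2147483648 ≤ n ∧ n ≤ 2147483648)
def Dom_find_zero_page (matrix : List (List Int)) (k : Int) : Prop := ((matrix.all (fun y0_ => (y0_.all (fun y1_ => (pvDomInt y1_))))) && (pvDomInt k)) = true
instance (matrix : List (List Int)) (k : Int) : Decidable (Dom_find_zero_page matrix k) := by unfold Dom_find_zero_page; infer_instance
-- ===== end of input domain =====

-- B precomputes a 2D prefix-sum table of zero counts and decides each k×k block by one
-- inclusion-exclusion query instead of A's per-position rescan with a resetting counter;
-- proved equal to A on matrices whose rows are at least as long as the first row.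

-- ===== PORT A =====
-- the inner 'count' double loop of A (resets to 0 on a nonzero cell);
-- out-of-range reads (IndexError, excluded by Pre_) are rendered by pyGetD defaults
def fzpCount (matrix : List (List Int)) (k i j : Int) : Int :=
  (PySem.List.pyRange 0 k 1).foldl (fun cnt r =>
    (PySem.List.pyRange 0 k 1).foldl (fun cnt c =>
      if PySem.List.pyGetD (PySem.List.pyGetD matrix (i + r) []) (j + c) 1 = 0
      then cnt + 1 else 0) cnt) 0

def find_zero_page (matrix : List (List Int)) (k : Int) : Option (Int × Int) :=
  let rows : Int := matrix.length
  let cols : Int := if rows > 0 then ((PySem.List.pyGetD matrix 0 []).length : Int) else 0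
  (PySem.List.pyRange 0 (rows - k + 1) 1).findSome? (fun i =>
    (PySem.List.pyRange 0 (cols - k + 1) 1).findSome? (fun j =>
      if fzpCount matrix k i j = k * k then some (i, j) else none))

-- ===== PORT B =====
-- Source B's inner row loop: cur = [0]; s = 0; for j in range(cols): s += (row[j]==0); cur.append(prev[j+1]+s)
def fzpRow (prev row : List Int) (cols : Int) : List Int :=
  ((PySem.List.pyRange 0 cols 1).foldl (fun (st : List Int × Int) j =>
      let s : Int := if PySem.List.pyGetD row j 1 = 0 then st.2 + 1 else st.2
      (st.1 ++ [PySem.List.pyGetD prev (j + 1) 0 + s], s)) ([0], 0)).1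

-- Source B's P-building loop: P = [[0]*(cols+1)]; for i in range(rows): P.append(cur-from-P[i]-and-matrix[i])
def fzpPrefix (matrix : List (List Int)) (rows cols : Int) : List (List Int) :=
  (PySem.List.pyRange 0 rows 1).foldl (fun P i =>
    P ++ [fzpRow (PySem.List.pyGetD P i []) (PySem.List.pyGetD matrix i []) cols])
    [List.replicate (cols.toNat + 1) 0]

def find_zero_page_alt (matrix : List (List Int)) (k : Int) : Option (Int × Int) :=
  if k < 0 then none else
  let rows : Int := matrix.length
  let cols : Int := if rows > 0 then ((PySem.List.pyGetD matrix 0 []).length : Int) else 0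
  let P := fzpPrefix matrix rows cols
  let target := k * k
  (PySem.List.pyRange 0 (rows - k + 1) 1).findSome? (fun i =>
    (PySem.List.pyRange 0 (cols - k + 1) 1).findSome? (fun j =>
      if PySem.List.pyGetD (PySem.List.pyGetD P (i + k) []) (j + k) 0
           - PySem.List.pyGetD (PySem.List.pyGetD P i []) (j + k) 0
           - PySem.List.pyGetD (PySem.List.pyGetD P (i + k) []) j 0
           + PySem.List.pyGetD (PySem.List.pyGetD P i []) j 0 = target
      then some (i, j) else none))

-- ===== PRECONDITION & SPEC =====
-- Pre_ excludes ragged matrices with a row shorter than the first row (unless k < 0, where neither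
-- program reads the matrix): there A raises IndexError except when an early exit accidentally
-- avoids the read, and B's prefix-sum pass always raises.
def Pre_find_zero_page (matrix : List (List Int)) (k : Int) : Prop :=
  k < 0 ∨ ∀ row ∈ matrix, (matrix.headD []).length ≤ row.length
instance (matrix : List (List Int)) (k : Int) : Decidable (Pre_find_zero_page matrix k) := by
  unfold Pre_find_zero_page; infer_instance

def pvWitness_find_zero_page : List (List Int) × Int := ([[1, 0], [0, 0]], 1)

def Spec_find_zero_page (matrix : List (List Int)) (k : Int) (out : Option (Int × Int)) : Prop := out = find_zero_page_alt matrix k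
instance (matrix : List (List Int)) (k : Int) (out : Option (Int × Int)) : Decidable (Spec_find_zero_page matrix k out) := by unfold Spec_find_zero_page; infer_instance

-- ===== CLAIM (what is proved, stated in full; the proofs are below) =====
def Claim_equal_find_zero_page : Prop := ∀ (matrix : List (List Int)) (k : Int), Dom_find_zero_page matrix k → Pre_find_zero_page matrix k → Spec_find_zero_page matrix k (find_zero_page matrix k)

-- ===== LEMMAS AND PROOFS =====

-- number of zeros among the first j entries of row r of m
def fzpG (m : List (List Int)) (r j : Nat) : Int :=
  (((m.getD r []).take j).countP (fun x => x == 0) : Int)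

-- number of zeros in the top-left i×j rectangle of m
def fzpZ (m : List (List Int)) (i j : Nat) : Int :=
  ((List.range i).map (fun r => fzpG m r j)).sum

-- row i of the ideal prefix table
def fzpPRow (m : List (List Int)) (C i : Nat) : List Int :=
  (List.range (C + 1)).map (fun j => fzpZ m i j)

-- the reset counter is bounded by init + length
theorem fzp_reset_le {α : Type} (l : List α) (p : α → Bool) :
    ∀ init : Int, 0 ≤ init →
      l.foldl (fun cnt x => if p x then cnt + 1 else 0) init ≤ init + l.length := by
  induction l with
  | nil => intro init h; simpa using h
  | cons x xs ih =>
    intro init h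
    simp only [List.foldl_cons]
    by_cases hp : p x
    · simp only [hp, if_pos]
      have := ih (init + 1) (by omega)
      simp only [List.length_cons]; push_cast; omega
    · simp only [hp, if_neg, not_false_iff]
      have := ih 0 le_rfl
      simp only [List.length_cons]; push_cast; omega

-- if all tests pass, the reset counter just counts
theorem fzp_reset_all {α : Type} (l : List α) (p : α → Bool) (h : ∀ x ∈ l, p x) :
    ∀ init : Int, l.foldl (fun cnt x => if p x then cnt + 1 else 0) init = init + l.length := by
  induction l with
  | nil => intro init; simp
  | cons x xs ih =>
    intro init
    have hx : p x := h x (List.mem_cons_self)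
    simp only [List.foldl_cons, hx, if_pos, List.length_cons]
    rw [ih (fun y hy => h y (List.mem_cons_of_mem _ hy)) (init + 1)]
    push_cast; ring

-- if some test fails, the reset counter ends strictly below the length
theorem fzp_reset_lt {α : Type} (l : List α) (p : α → Bool) (h : ∃ x ∈ l, ¬ p x) :
    ∀ init : Int, l.foldl (fun cnt x => if p x then cnt + 1 else 0) init < l.length := by
  induction l with
  | nil => simp at h
  | cons x xs ih =>
    intro init
    simp only [List.foldl_cons, List.length_cons]
    by_cases hp : p x
    · have hxs : ∃ y ∈ xs, ¬ p y := by
        rcases h with ⟨y, hy, hpy⟩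
        rcases List.mem_cons.mp hy with rfl | hy'
        · exact absurd hp hpy
        · exact ⟨y, hy', hpy⟩
      simp only [hp, if_pos]
      have := ih hxs (init + 1)
      push_cast; omega
    · simp only [hp, if_neg, not_false_iff]
      have := fzp_reset_le xs p 0 le_rfl
      push_cast; omega

-- A's count equals k*k iff every cell of the k×k block reads zero
theorem fzpCount_eq_iff (m : List (List Int)) (K : Nat) (i j : Int) :
    (fzpCount m (K : Int) i j = (K : Int) * (K : Int)) ↔
      (∀ r < K, ∀ c < K,
        PySem.List.pyGetD (PySem.List.pyGetD m (i + (r : Int)) []) (j + (c : Int)) 1 = 0) := by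
  classical
  set p : Nat × Nat → Bool := fun rc =>
    decide (PySem.List.pyGetD (PySem.List.pyGetD m (i + (rc.1 : Int)) []) (j + (rc.2 : Int)) 1 = 0) with hp
  set L : List (Nat × Nat) := (List.range K).flatMap (fun r => (List.range K).map (fun c => (r, c))) with hL
  have hfold : fzpCount m (K : Int) i j = L.foldl (fun cnt rc => if p rc then cnt + 1 else 0) 0 := by
    rw [fzpCount, PySem.List.pyRange_zero_natCast K, hL, List.foldl_flatMap]
    rw [List.foldl_map]
    congr 1
    funext cnt r
    rw [List.foldl_map, List.foldl_map]
    congr 1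
    funext cnt c
    simp [hp]
  have hlen : L.length = K * K := by
    simp [hL, List.length_flatMap, Function.comp]
  have hmem : ∀ rc : Nat × Nat, rc ∈ L ↔ rc.1 < K ∧ rc.2 < K := by
    intro rc
    simp [hL, List.mem_flatMap, List.mem_map, List.mem_range]
    constructor
    · rintro ⟨r, hr, c, hc, rfl⟩; exact ⟨hr, hc⟩
    · rintro ⟨h1, h2⟩; exact ⟨rc.1, h1, rc.2, h2, rfl⟩
  rw [hfold]
  by_cases hall : ∀ x ∈ L, p x
  · rw [fzp_reset_all L p hall 0]
    simp only [hlen, zero_add]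
    constructor
    · intro _ r hr c hc
      have := hall (r, c) ((hmem (r, c)).mpr ⟨hr, hc⟩)
      simpa [hp] using this
    · intro _; push_cast; ring
  · push_neg at hall
    have hlt := fzp_reset_lt L p (by rcases hall with ⟨x, hx, hpx⟩; exact ⟨x, hx, by simpa using hpx⟩) 0
    constructor
    · intro heq
      exfalso
      rw [heq] at hlt
      rw [hlen] at hlt
      push_cast at hlt
      nlinarith
    · intro hz
      exfalso
      rcases hall with ⟨x, hx, hpx⟩
      rcases (hmem x).mp hx with ⟨h1, h2⟩
      exact hpx (by simp [hp, hz x.1 h1 x.2 h2])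

-- a sum of terms each ≤ c equals c·len iff every term is c
theorem fzp_sum_eq_iff {α : Type} (l : List α) (f : α → Int) (c : Int)
    (h : ∀ x ∈ l, f x ≤ c) :
    ((l.map f).sum = c * l.length) ↔ (∀ x ∈ l, f x = c) := by
  induction l with
  | nil => simp
  | cons x xs ih =>
    have hx := h x (List.mem_cons_self)
    have hxs : ∀ y ∈ xs, f y ≤ c := fun y hy => h y (List.mem_cons_of_mem _ hy)
    have hsum : (xs.map f).sum ≤ c * xs.length := by
      clear ih hx h
      induction xs with
      | nil => simp
      | cons z zs ihz =>
        simp only [List.map_cons, List.sum_cons, List.length_cons]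
        have h1 := hxs z (List.mem_cons_self)
        have h2 := ihz (fun y hy => hxs y (List.mem_cons_of_mem _ hy))
        push_cast; push_cast at h2; nlinarith
    constructor
    · intro heq
      simp only [List.map_cons, List.sum_cons, List.length_cons] at heq
      push_cast at heq
      have hfx : f x = c := le_antisymm hx (by linarith)
      intro y hy
      rcases List.mem_cons.mp hy with rfl | hy'
      · exact hfx
      · exact (ih hxs).mp (by push_cast; linarith) y hy'
    · intro hall
      simp only [List.map_cons, List.sum_cons, List.length_cons]
      rw [hall x (List.mem_cons_self), (ih hxs).mpr (fun y hy => hall y (List.mem_cons_of_mem _ hy))]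
      push_cast; ring

theorem fzpZ_zero (m : List (List Int)) (i : Nat) : fzpZ m i 0 = 0 := by
  simp [fzpZ, fzpG]

theorem fzpZ_succ (m : List (List Int)) (i j : Nat) :
    fzpZ m (i + 1) j = fzpZ m i j + fzpG m i j := by
  simp [fzpZ, List.range_succ]

-- the row builder maps the ideal row i to the ideal row i+1
theorem fzpRow_char (m : List (List Int)) (C i : Nat)
    (hC : C ≤ (m.getD i []).length) :
    fzpRow (fzpPRow m C i) (m.getD i []) (C : Int) = fzpPRow m C (i + 1) := by
  rw [fzpRow, PySem.List.pyRange_zero_natCast C, List.foldl_map]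
  have aux : ∀ t : Nat, t ≤ C →
      (List.range t).foldl (fun (st : List Int × Int) (jN : Nat) =>
        let s : Int := if PySem.List.pyGetD (m.getD i []) (jN : Int) 1 = 0 then st.2 + 1 else st.2
        (st.1 ++ [PySem.List.pyGetD (fzpPRow m C i) ((jN : Int) + 1) 0 + s], s)) ([0], 0)
      = ((List.range (t + 1)).map (fun j => fzpZ m (i + 1) j), fzpG m i t) := by
    intro t
    induction t with
    | zero =>
      intro _
      simp [fzpG, fzpZ_zero]
    | succ t ih =>
      intro ht
      rw [List.range_succ, List.foldl_append, ih (by omega), List.foldl_cons, List.foldl_nil]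
      have hjrange : t < (m.getD i []).length := by omega
      have hget : PySem.List.pyGetD (m.getD i []) (t : Int) 1 = (m.getD i [])[t] := by
        rw [PySem.List.pyGetD_natCast, List.getD_eq_getElem _ 1 hjrange]
      have hprev : PySem.List.pyGetD (fzpPRow m C i) ((t : Int) + 1) 0 = fzpZ m i (t + 1) := by
        rw [show ((t : Int) + 1) = ((t + 1 : Nat) : Int) by push_cast; ring,
          PySem.List.pyGetD_natCast]
        rw [fzpPRow, List.getD_eq_getElem _ 0 (by simp; omega)]
        simp
      have hs : (if PySem.List.pyGetD (m.getD i []) (t : Int) 1 = 0 then fzpG m i t + 1 else fzpG m i t)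
          = fzpG m i (t + 1) := by
        rw [hget, fzpG, fzpG, List.take_succ, List.getElem?_eq_getElem hjrange]
        simp only [Option.toList_some, List.countP_append, List.countP_cons, List.countP_nil,
          beq_iff_eq]
        split_ifs with hz <;> push_cast <;> ring
      simp only []
      rw [hs, hprev]
      simp only [Prod.mk.injEq]
      refine ⟨?_, trivial⟩
      rw [List.range_succ (n := t + 1), List.map_append]
      simp [fzpZ_succ]
  have h1 := congrArg Prod.fst (aux C le_rfl)
  simpa [fzpPRow] using h1

-- the built table is the ideal table
theorem fzpPrefix_char (m : List (List Int)) (C : Nat)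
    (h : ∀ row ∈ m, C ≤ row.length) :
    fzpPrefix m (m.length : Int) (C : Int)
      = (List.range (m.length + 1)).map (fun i => fzpPRow m C i) := by
  rw [fzpPrefix, PySem.List.pyRange_zero_natCast, List.foldl_map]
  have hrep : [List.replicate ((C : Int).toNat + 1) (0 : Int)] = [fzpPRow m C 0] := by
    congr 1
    rw [fzpPRow]
    rw [show (C : Int).toNat = C by omega]
    have hz0 : (fun j => fzpZ m 0 j) = fun _ : Nat => (0 : Int) := by
      funext j; simp [fzpZ]
    rw [hz0]
    simp
  rw [hrep]
  have aux : ∀ n : Nat, n ≤ m.length →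
      (List.range n).foldl (fun P (iN : Nat) =>
        P ++ [fzpRow (PySem.List.pyGetD P (iN : Int) []) (PySem.List.pyGetD m (iN : Int) []) (C : Int)])
        [fzpPRow m C 0]
      = (List.range (n + 1)).map (fun i => fzpPRow m C i) := by
    intro n
    induction n with
    | zero => intro _; simp
    | succ n ih =>
      intro hn
      rw [List.range_succ, List.foldl_append, ih (by omega), List.foldl_cons, List.foldl_nil]
      have hgetP : PySem.List.pyGetD ((List.range (n + 1)).map (fun i => fzpPRow m C i)) ((n : Nat) : Int) []
          = fzpPRow m C n := by
        rw [PySem.List.pyGetD_natCast, List.getD_eq_getElem _ [] (by simp)]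
        simp
      have hgetm : PySem.List.pyGetD m ((n : Nat) : Int) [] = m.getD n [] := by
        rw [PySem.List.pyGetD_natCast]
      rw [hgetP, hgetm]
      have hCn : C ≤ (m.getD n []).length := by
        apply h
        rw [List.getD_eq_getElem m [] (by omega)]
        exact List.getElem_mem _
      rw [fzpRow_char m C n hCn]
      rw [List.range_succ (n := n + 1), List.map_append]
      simp
  exact aux m.length le_rfl

-- inclusion–exclusion: the block query is the sum of per-row segment counts
theorem fzpZ_add (m : List (List Int)) (i K j : Nat) :
    fzpZ m (i + K) j = fzpZ m i j + ((List.range K).map (fun t => fzpG m (i + t) j)).sum := by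
  rw [fzpZ, List.range_add, List.map_append, List.sum_append, List.map_map]
  rfl

theorem fzp_query (m : List (List Int)) (i j K : Nat) :
    fzpZ m (i + K) (j + K) - fzpZ m i (j + K) - fzpZ m (i + K) j + fzpZ m i j
      = ((List.range K).map (fun t => fzpG m (i + t) (j + K) - fzpG m (i + t) j)).sum := by
  rw [fzpZ_add m i K (j + K), fzpZ_add m i K j]
  have : ((List.range K).map (fun t => fzpG m (i + t) (j + K) - fzpG m (i + t) j)).sum
      = ((List.range K).map (fun t => fzpG m (i + t) (j + K))).sum
        - ((List.range K).map (fun t => fzpG m (i + t) j)).sum := by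
    induction (List.range K) with
    | nil => simp
    | cons x xs ih => simp [ih]; ring
  rw [this]; ring

-- per-row segment count equals K iff the K cells are all zero (row long enough)
theorem fzp_seg_eq_iff (row : List Int) (j K : Nat) (hlen : j + K ≤ row.length) :
    ((row.take (j + K)).countP (fun x => x == 0) : Int) - ((row.take j).countP (fun x => x == 0) : Int) = (K : Int)
      ↔ ∀ c < K, row.getD (j + c) 1 = 0 := by
  have hsplit : row.take (j + K) = row.take j ++ ((row.drop j).take K) := by
    rw [List.take_add]
  rw [hsplit, List.countP_append]
  have hseglen : ((row.drop j).take K).length = K := by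
    simp [List.length_take, List.length_drop]; omega
  push_cast
  have : ((row.take j).countP (fun x => x == 0) : Int) + (((row.drop j).take K).countP (fun x => x == 0) : Int)
      - ((row.take j).countP (fun x => x == 0) : Int) = (((row.drop j).take K).countP (fun x => x == 0) : Int) := by ring
  rw [this]
  constructor
  · intro h c hc
    have hcnt : ((row.drop j).take K).countP (fun x => x == 0) = ((row.drop j).take K).length := by
      rw [hseglen]; exact_mod_cast h
    have hall := List.countP_eq_length.mp hcnt
    have hmem : row[j + c]'(by omega) ∈ (row.drop j).take K := by
      rw [List.mem_iff_getElem]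
      refine ⟨c, by omega, ?_⟩
      rw [List.getElem_take, List.getElem_drop]
    have := hall _ hmem
    rw [List.getD_eq_getElem row 1 (by omega)]
    simpa using this
  · intro h
    have hall : ∀ x ∈ (row.drop j).take K, (x == 0) = true := by
      intro x hx
      rw [List.mem_iff_getElem] at hx
      rcases hx with ⟨c, hcl, rfl⟩
      rw [hseglen] at hcl
      have := h c hcl
      rw [List.getD_eq_getElem row 1 (by omega)] at this
      simp only [List.getElem_take, List.getElem_drop]
      simpa using this
    rw [List.countP_eq_length.mpr hall, hseglen]

-- the block query equals k*k iff every cell of the block is zero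
theorem fzp_seg_le (row : List Int) (j K : Nat) :
    ((row.take (j + K)).countP (fun x => x == 0) : Int) - ((row.take j).countP (fun x => x == 0) : Int) ≤ (K : Int) := by
  rw [List.take_add, List.countP_append]
  have h1 : ((row.drop j).take K).countP (fun x => x == 0) ≤ K :=
    le_trans List.countP_le_length (by simp [List.length_take])
  push_cast
  omega

theorem fzp_block_iff (m : List (List Int)) (C i j K : Nat)
    (hrows : ∀ row ∈ m, C ≤ row.length)
    (hi : i + K ≤ m.length) (hj : j + K ≤ C) :
    (fzpZ m (i + K) (j + K) - fzpZ m i (j + K) - fzpZ m (i + K) j + fzpZ m i j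
        = (K : Int) * (K : Int))
      ↔ (∀ r < K, ∀ c < K, (m.getD (i + r) []).getD (j + c) 1 = 0) := by
  rw [fzp_query]
  have hlenrow : ∀ t < K, j + K ≤ (m.getD (i + t) []).length := by
    intro t ht
    have hmem : m.getD (i + t) [] ∈ m := by
      rw [List.getD_eq_getElem m [] (by omega)]
      exact List.getElem_mem _
    exact le_trans hj (hrows _ hmem)
  have hle : ∀ t ∈ List.range K, fzpG m (i + t) (j + K) - fzpG m (i + t) j ≤ (K : Int) := by
    intro t _
    exact fzp_seg_le _ j K
  have := fzp_sum_eq_iff (List.range K) (fun t => fzpG m (i + t) (j + K) - fzpG m (i + t) j) (K : Int) hle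
  rw [List.length_range] at this
  rw [this]
  constructor
  · intro h r hr c hc
    have := (fzp_seg_eq_iff (m.getD (i + r) []) j K (hlenrow r hr)).mp (h r (List.mem_range.mpr hr))
    exact this c hc
  · intro h t ht
    have htK := List.mem_range.mp ht
    exact (fzp_seg_eq_iff (m.getD (i + t) []) j K (hlenrow t htK)).mpr (fun c hc => h t htK c hc)

theorem fzp_findSome_congr {α β : Type} (l : List α) (f g : α → Option β)
    (h : ∀ x ∈ l, f x = g x) : l.findSome? f = l.findSome? g := by
  induction l with
  | nil => simp
  | cons x xs ih =>
    simp only [List.findSome?_cons, h x (List.mem_cons_self)]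
    cases g x with
    | none => exact ih (fun y hy => h y (List.mem_cons_of_mem _ hy))
    | some b => rfl

-- ===== VERDICT (by name: the statement is the Claim_ definition above) =====
-- lookup into the characterized prefix table
theorem fzp_lookup (m : List (List Int)) (C a b : Nat)
    (hrows : ∀ row ∈ m, C ≤ row.length) (ha : a ≤ m.length) (hb : b ≤ C) :
    PySem.List.pyGetD (PySem.List.pyGetD (fzpPrefix m (m.length : Int) (C : Int)) (a : Int) [])
      (b : Int) 0 = fzpZ m a b := by
  rw [fzpPrefix_char m C hrows]
  rw [show PySem.List.pyGetD ((List.range (m.length + 1)).map (fun i => fzpPRow m C i)) (a : Int) []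
        = fzpPRow m C a from by
      rw [PySem.List.pyGetD_natCast, List.getD_eq_getElem _ [] (by simp; omega)]
      simp]
  rw [PySem.List.pyGetD_natCast, fzpPRow, List.getD_eq_getElem _ 0 (by simp; omega)]
  simp

theorem find_zero_page_spec : Claim_equal_find_zero_page := by
  intro matrix k _dom hpre
  unfold Spec_find_zero_page
  by_cases hk : k < 0
  · rw [find_zero_page_alt, if_pos hk]
    simp only [find_zero_page]
    apply List.findSome?_eq_none_iff.mpr
    intro i _
    apply List.findSome?_eq_none_iff.mpr
    intro j _
    have hcount : fzpCount matrix k i j = 0 := by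
      rw [fzpCount, PySem.List.pyRange_one_eq_nil (by omega)]
      rfl
    have hne : ¬ (fzpCount matrix k i j = k * k) := by
      rw [hcount]; nlinarith
    simp [hne]
  · obtain ⟨K, rfl⟩ : ∃ K : Nat, k = (K : Int) := ⟨k.toNat, by omega⟩
    have hheads : matrix.headD [] = matrix.getD 0 [] := by cases matrix <;> rfl
    set C : Nat := (matrix.getD 0 []).length with hCdef
    have hpre' : ∀ row ∈ matrix, (matrix.headD []).length ≤ row.length := by
      rcases hpre with hneg | h
      · exact absurd hneg hk
      · exact h
    have hrows : ∀ row ∈ matrix, C ≤ row.length := by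
      intro row hr
      have := hpre' row hr
      rwa [hheads] at this
    have hcols : (if (matrix.length : Int) > 0 then ((PySem.List.pyGetD matrix 0 []).length : Int) else 0) = (C : Int) := by
      cases matrix with
      | nil => simp [hCdef]
      | cons r t => simp [hCdef, PySem.List.pyGetD_zero_cons]
    simp only [find_zero_page, find_zero_page_alt, if_neg (by omega : ¬ ((K : Int) < 0)), hcols]
    apply fzp_findSome_congr
    intro i hi
    rw [PySem.List.mem_pyRange_one] at hi
    obtain ⟨iN, rfl⟩ : ∃ n : Nat, i = (n : Int) := ⟨i.toNat, by omega⟩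
    apply fzp_findSome_congr
    intro j hj
    rw [PySem.List.mem_pyRange_one] at hj
    obtain ⟨jN, rfl⟩ : ∃ n : Nat, j = (n : Int) := ⟨j.toNat, by omega⟩
    have hiK : iN + K ≤ matrix.length := by
      rcases hi with ⟨_, hi2⟩
      have : (iN : Int) < (matrix.length : Int) - (K : Int) + 1 := hi2
      omega
    have hjK : jN + K ≤ C := by
      rcases hj with ⟨_, hj2⟩
      have : (jN : Int) < (C : Int) - (K : Int) + 1 := hj2
      omega
    -- the two block conditions are equivalent
    have hA := fzpCount_eq_iff matrix K (iN : Int) (jN : Int)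
    have hcells : (∀ r < K, ∀ c < K,
        PySem.List.pyGetD (PySem.List.pyGetD matrix ((iN : Int) + (r : Int)) []) ((jN : Int) + (c : Int)) 1 = 0)
        ↔ (∀ r < K, ∀ c < K, (matrix.getD (iN + r) []).getD (jN + c) 1 = 0) := by
      refine forall₂_congr (fun r _ => forall₂_congr (fun c _ => ?_))
      rw [show (iN : Int) + (r : Int) = ((iN + r : Nat) : Int) by push_cast; ring,
        PySem.List.pyGetD_natCast,
        show (jN : Int) + (c : Int) = ((jN + c : Nat) : Int) by push_cast; ring,
        PySem.List.pyGetD_natCast]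
    have hB := fzp_block_iff matrix C iN jN K hrows hiK hjK
    have hq : PySem.List.pyGetD (PySem.List.pyGetD (fzpPrefix matrix (matrix.length : Int) (C : Int)) ((iN : Int) + (K : Int)) []) ((jN : Int) + (K : Int)) 0
        - PySem.List.pyGetD (PySem.List.pyGetD (fzpPrefix matrix (matrix.length : Int) (C : Int)) (iN : Int) []) ((jN : Int) + (K : Int)) 0
        - PySem.List.pyGetD (PySem.List.pyGetD (fzpPrefix matrix (matrix.length : Int) (C : Int)) ((iN : Int) + (K : Int)) []) (jN : Int) 0
        + PySem.List.pyGetD (PySem.List.pyGetD (fzpPrefix matrix (matrix.length : Int) (C : Int)) (iN : Int) []) (jN : Int) 0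
        = fzpZ matrix (iN + K) (jN + K) - fzpZ matrix iN (jN + K) - fzpZ matrix (iN + K) jN + fzpZ matrix iN jN := by
      rw [show (iN : Int) + (K : Int) = ((iN + K : Nat) : Int) by push_cast; ring,
        show (jN : Int) + (K : Int) = ((jN + K : Nat) : Int) by push_cast; ring]
      rw [fzp_lookup matrix C (iN + K) (jN + K) hrows hiK (by omega),
        fzp_lookup matrix C iN (jN + K) hrows (by omega) (by omega),
        fzp_lookup matrix C (iN + K) jN hrows hiK (by omega),
        fzp_lookup matrix C iN jN hrows (by omega) (by omega)]
    have hcond : (fzpCount matrix (K : Int) (iN : Int) (jN : Int) = (K : Int) * (K : Int))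
        ↔ (PySem.List.pyGetD (PySem.List.pyGetD (fzpPrefix matrix (matrix.length : Int) (C : Int)) ((iN : Int) + (K : Int)) []) ((jN : Int) + (K : Int)) 0
            - PySem.List.pyGetD (PySem.List.pyGetD (fzpPrefix matrix (matrix.length : Int) (C : Int)) (iN : Int) []) ((jN : Int) + (K : Int)) 0
            - PySem.List.pyGetD (PySem.List.pyGetD (fzpPrefix matrix (matrix.length : Int) (C : Int)) ((iN : Int) + (K : Int)) []) (jN : Int) 0
            + PySem.List.pyGetD (PySem.List.pyGetD (fzpPrefix matrix (matrix.length : Int) (C : Int)) (iN : Int) []) (jN : Int) 0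
            = (K : Int) * (K : Int)) := by
      rw [hq, hA, hcells, hB]
    by_cases hc : fzpCount matrix (K : Int) (iN : Int) (jN : Int) = (K : Int) * (K : Int)
    · rw [if_pos hc, if_pos (hcond.mp hc)]
    · rw [if_neg hc, if_neg (fun h => hc (hcond.mpr h))]
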